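-- pv_equiv track=rewrite | github.com/Alexander1337c/tms-hw | hw-13/hw-13-2 generate.py | cycle_subs
-- ===== SOURCE A (Python) =====
-- def cycle_subs(num, subs):
--     inner_cycle = num
--     count = 0
--     while num > 0:
--         for i in subs:
--             if count < inner_cycle:
--                 yield i
--             else:
--                 break
--             count += 1
--         num -= 1
-- ===== SOURCE B (Python) =====
-- def cycle_subs(num, subs):
--     # Simpler: one flat counter loop with modular indexing instead of
--     # A's nested outer-while + inner-for that spins down doing nothing.
--     lst = list(subs)
--     if not lst:
--         return
--     count = 0
--     while count < num:
--         yield lst[count % len(lst)]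
--         count += 1
-- ===== Notes on version B (the rewrite author's own statement) =====
-- stated objective: simpler
-- what changed: Replaced the nested outer-while plus inner-for (which keeps spinning emptily after the quota is reached) with a single flat counter loop that yields lst[count % len(lst)] while count < num.
import Mathlib
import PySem

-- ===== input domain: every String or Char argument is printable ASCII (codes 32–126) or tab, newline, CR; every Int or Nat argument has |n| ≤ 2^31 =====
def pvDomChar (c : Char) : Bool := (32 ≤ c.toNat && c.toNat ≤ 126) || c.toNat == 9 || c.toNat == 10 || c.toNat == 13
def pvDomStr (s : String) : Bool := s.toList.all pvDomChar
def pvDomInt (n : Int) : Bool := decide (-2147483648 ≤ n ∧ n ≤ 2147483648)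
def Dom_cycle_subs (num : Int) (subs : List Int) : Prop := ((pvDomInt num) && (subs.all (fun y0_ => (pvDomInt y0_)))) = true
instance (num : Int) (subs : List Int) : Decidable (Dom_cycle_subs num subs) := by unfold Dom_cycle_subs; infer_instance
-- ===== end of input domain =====

-- B replaces A's nested outer-while + inner-for by one flat modular-index counter loop (simpler).

-- ===== PORT A =====
-- inner 'for i in subs: if count < inner_cycle: yield i else: break; count += 1'
-- returns (yielded elements, final count)
def pvInnerA (ic : Int) : List Int → Int → (List Int × Int)
  | [], count => ([], count)
  | i :: rest, count =>
    if count < ic then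
      let r := pvInnerA ic rest (count + 1)
      (i :: r.1, r.2)
    else ([], count)

-- outer 'while num > 0: …; num -= 1' — runs num.toNat times
def pvOuterA (ic : Int) (subs : List Int) : Nat → Int → List Int
  | 0, _ => []
  | n + 1, count =>
    let r := pvInnerA ic subs count
    r.1 ++ pvOuterA ic subs n r.2

def cycle_subs (num : Int) (subs : List Int) : List Int :=
  pvOuterA num subs num.toNat 0

-- ===== PORT B =====
-- 'while count < num: yield lst[count % len(lst)]; count += 1' — runs at most num.toNat times
def pvLoopB (num : Int) (lst : List Int) : Nat → Int → List Int
  | 0, _ => []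
  | f + 1, count =>
    if count < num then
      match PySem.List.pyGet? lst (PySem.Int.mod count (lst.length : Int)) with
      | some v => v :: pvLoopB num lst f (count + 1)
      | none => []   -- unreachable: 0 ≤ count % len < len when lst ≠ []
    else []

def cycle_subs_alt (num : Int) (subs : List Int) : List Int :=
  if subs = [] then [] else pvLoopB num subs num.toNat 0

-- ===== PRECONDITION & SPEC =====
def Spec_cycle_subs (num : Int) (subs : List Int) (out : List Int) : Prop := out = cycle_subs_alt num subs
instance (num : Int) (subs : List Int) (out : List Int) : Decidable (Spec_cycle_subs num subs out) := by unfold Spec_cycle_subs; infer_instance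

-- ===== CLAIM (what is proved, stated in full; the proofs are below) =====
def Claim_equal_cycle_subs : Prop := ∀ (num : Int) (subs : List Int), Dom_cycle_subs num subs → Spec_cycle_subs num subs (cycle_subs num subs)

-- ===== LEMMAS AND PROOFS =====

-- canonical form: k elements of the infinite modular cycle of lst, starting at counter c
def pvCyc (lst : List Int) : Nat → Int → List Int
  | 0, _ => []
  | k + 1, c =>
    (PySem.List.pyGet? lst (PySem.Int.mod c (lst.length : Int))).getD 0 :: pvCyc lst k (c + 1)

theorem pvCyc_append (lst : List Int) (a b : Nat) (c : Int) :
    pvCyc lst (a + b) c = pvCyc lst a c ++ pvCyc lst b (c + a) := by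
  induction a generalizing c with
  | zero => simp [pvCyc]
  | succ a ih =>
    have h1 : a + 1 + b = (a + b) + 1 := by omega
    rw [h1]
    simp only [pvCyc, ih, List.cons_append]
    have h2 : c + 1 + (a : Int) = c + ((a : Int) + 1) := by ring
    simp only [Nat.cast_add, Nat.cast_one, h2]

theorem pvCyc_eq_drop_take (lst : List Int) (c : Int) (hc : 0 ≤ c)
    (hdvd : ((lst.length : Int)) ∣ c) :
    ∀ (t j : Nat), j + t ≤ lst.length →
      pvCyc lst t (c + j) = (lst.drop j).take t := by
  intro t
  induction t generalizing c with
  | zero => intro j _; simp [pvCyc]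
  | succ t ih =>
    intro j hj
    have hjlen : j < lst.length := by omega
    have hlpos : (0 : Int) < (lst.length : Int) := by exact_mod_cast Nat.lt_of_le_of_lt (Nat.zero_le j) hjlen
    obtain ⟨q, hq⟩ := hdvd
    have hm : PySem.Int.mod (c + (j : Int)) (lst.length : Int) = (j : Int) := by
      rw [PySem.Int.mod_eq_emod_of_pos hlpos, hq, add_comm]
      rw [Int.add_mul_emod_self_left]
      exact Int.emod_eq_of_lt (by positivity) (by exact_mod_cast hjlen)
    have hget : PySem.List.pyGet? lst ((j : Int)) = some lst[j] :=
      PySem.List.pyGet?_ofNat lst j hjlen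
    have hdrop : lst.drop j = lst[j] :: lst.drop (j + 1) :=
      List.drop_eq_getElem_cons hjlen
    simp only [pvCyc, hm, hget, Option.getD_some, hdrop, List.take_succ_cons]
    have hstep : c + (j : Int) + 1 = c + ((j + 1 : Nat) : Int) := by push_cast; ring
    rw [hstep, ih c hc ⟨q, hq⟩ (j + 1) (by omega)]

theorem pvTake_eq_pvCyc (lst : List Int) (c : Int) (hc : 0 ≤ c)
    (hdvd : ((lst.length : Int)) ∣ c) (t : Nat) (ht : t ≤ lst.length) :
    lst.take t = pvCyc lst t c := by
  have := pvCyc_eq_drop_take lst c hc hdvd t 0 (by omega)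
  simpa using this.symm

-- inner pass characterisation
theorem pvInnerA_eq (ic : Int) (l : List Int) (count : Int) :
    pvInnerA ic l count =
      (l.take ((ic - count).toNat ⊓ l.length),
       count + (((ic - count).toNat ⊓ l.length : Nat) : Int)) := by
  induction l generalizing count with
  | nil => simp [pvInnerA]
  | cons i rest ih =>
    by_cases h : count < ic
    · have ht : (ic - count).toNat ⊓ (rest.length + 1)
          = ((ic - (count + 1)).toNat ⊓ rest.length) + 1 := by omega
      simp only [pvInnerA, if_pos h, ih, List.length_cons, ht, List.take_succ_cons]
      simp only [Prod.mk.injEq, true_and]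
      push_cast; ring
    · have ht : (ic - count).toNat = 0 := by omega
      simp [pvInnerA, if_neg h, ht]

-- once the quota is used up every further pass yields nothing
theorem pvOuterA_done (ic : Int) (subs : List Int) (n : Nat) (count : Int)
    (h : ic ≤ count) : pvOuterA ic subs n count = [] := by
  induction n with
  | zero => rfl
  | succ n ih =>
    have hin : pvInnerA ic subs count = ([], count) := by
      cases subs with
      | nil => rfl
      | cons i rest => simp [pvInnerA, not_lt.mpr h]
    simp [pvOuterA, hin, ih]

theorem pvOuterA_eq_pvCyc (ic : Int) (subs : List Int) (hne : subs ≠ [])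
    (n : Nat) (c : Int) (hc : 0 ≤ c) (hdvd : ((subs.length : Int)) ∣ c) :
    pvOuterA ic subs n c = pvCyc subs ((n * subs.length) ⊓ (ic - c).toNat) c := by
  induction n generalizing c with
  | zero => simp [pvOuterA, pvCyc]
  | succ n ih =>
    have hlen : 0 < subs.length := List.length_pos_of_ne_nil hne
    set t : Nat := (ic - c).toNat ⊓ subs.length with ht
    have htle : t ≤ subs.length := by omega
    have htake : subs.take t = pvCyc subs t c := pvTake_eq_pvCyc subs c hc hdvd t htle
    simp only [pvOuterA, pvInnerA_eq, ← ht]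
    by_cases hfull : subs.length ≤ (ic - c).toNat
    · have htlen : t = subs.length := by omega
      have hdvd' : ((subs.length : Int)) ∣ (c + (t : Nat)) := by
        rw [htlen]; exact dvd_add hdvd ⟨1, by ring⟩
      rw [ih (c + (t : Nat)) (by omega) hdvd']
      rw [htake]
      have harith : (n + 1) * subs.length ⊓ (ic - c).toNat
          = t + (n * subs.length ⊓ (ic - (c + (t : Int))).toNat) := by
        have hmul : (n + 1) * subs.length = n * subs.length + subs.length := by ring
        omega
      rw [harith, pvCyc_append]
    · -- partial pass: t = (ic - c).toNat, afterwards the quota is exhausted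
      have htval : t = (ic - c).toNat := by omega
      have hdone : ic ≤ c + ((t : Nat) : Int) := by omega
      rw [pvOuterA_done ic subs n _ hdone, htake, List.append_nil]
      have harith : (n + 1) * subs.length ⊓ (ic - c).toNat = t := by
        have hge : subs.length ≤ (n + 1) * subs.length :=
          Nat.le_mul_of_pos_left subs.length (Nat.succ_pos n)
        omega
      rw [harith]

theorem pvLoopB_eq_pvCyc (num : Int) (lst : List Int) (hne : lst ≠ []) :
    ∀ (f : Nat) (count : Int),
      pvLoopB num lst f count = pvCyc lst (f ⊓ (num - count).toNat) count := by
  intro f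
  induction f with
  | zero => intro count; simp [pvLoopB, pvCyc]
  | succ f ih =>
    intro count
    by_cases h : count < num
    · have hlen : 0 < lst.length := List.length_pos_of_ne_nil hne
      have hlenI : (0 : Int) < (lst.length : Int) := by exact_mod_cast hlen
      have h0 : 0 ≤ PySem.Int.mod count (lst.length : Int) := PySem.Int.mod_nonneg _ hlenI
      have h1 : PySem.Int.mod count (lst.length : Int) < (lst.length : Int) :=
        PySem.Int.mod_lt _ hlenI
      have hget := PySem.List.pyGet?_eq_some_getElem (xs := lst)
        (i := PySem.Int.mod count (lst.length : Int)) h0 h1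
      have harith : (f + 1) ⊓ (num - count).toNat = (f ⊓ (num - (count + 1)).toNat) + 1 := by
        omega
      simp only [pvLoopB, if_pos h, hget, ih (count + 1), harith, pvCyc, Option.getD_some]
    · have h0 : (num - count).toNat = 0 := by omega
      simp [pvLoopB, if_neg h, h0, pvCyc]

-- ===== VERDICT (by name: the statement is the Claim_ definition above) =====
theorem cycle_subs_spec : Claim_equal_cycle_subs := by
  intro num subs _
  unfold Spec_cycle_subs cycle_subs cycle_subs_alt
  by_cases hne : subs = []
  · subst hne
    have : ∀ n c, pvOuterA num [] n c = [] := by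
      intro n
      induction n with
      | zero => intro c; rfl
      | succ n ih => intro c; simp [pvOuterA, pvInnerA, ih]
    simp [this]
  · rw [if_neg hne]
    have hlen : 0 < subs.length := List.length_pos_of_ne_nil hne
    rw [pvOuterA_eq_pvCyc num subs hne num.toNat 0 le_rfl (dvd_zero _)]
    rw [pvLoopB_eq_pvCyc num subs hne num.toNat 0]
    congr 1
    have := Nat.le_mul_of_pos_right num.toNat hlen
    omega
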